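-- pv_equiv track=rewrite | github.com/Adem54/Python-Tutorials | Günün Soruları/liste_ayni_eleman_bulan fonksiyonu yazma.py | tekrar_eden_elemanlari_bul
-- ===== SOURCE A (Python) =====
-- def tekrar_eden_elemanlari_bul(test_list):
--     liste = []
--     for eleman in test_list:
--         if eleman not in liste:
--             liste.append(eleman)
--     new_list = []
--     for eleman in liste:
--
--         if eleman in test_list:
--             count = 0  # aynı elemanlardan kaç tane olduğunu buulmak için
--             sayac = -1  # aynı elemanların indislerinin kaç olduğunu bulmak için
--
--             yeni_liste = []
--             every_member = []
--             new_indis = []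
--
--             for member in test_list:
--
--                 sayac += 1
--
--                 if member == eleman:
--                     new_indis.append(sayac)
--
--                     count += 1
--
--             yeni_liste.append(eleman)
--             yeni_liste.append(count)
--             every_member.append(yeni_liste)
--             every_member.append(new_indis)
--             new_list.append(every_member)
--     return new_list
-- ===== SOURCE B (Python) =====
-- def tekrar_eden_elemanlari_bul(test_list):
--     tablo = {}
--     for i, x in enumerate(test_list):
--         tablo.setdefault(x, []).append(i)
--     return [[[x, len(idx)], idx] for x, idx in tablo.items()]
-- ===== Notes on version B (the rewrite author's own statement) =====
-- stated objective: faster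
-- what changed: Replaces A's dedup list plus a full rescan of test_list for every distinct element with a single enumerate pass building an insertion-ordered dict element -> index list, then one emit pass over dict items.
import Mathlib
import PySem

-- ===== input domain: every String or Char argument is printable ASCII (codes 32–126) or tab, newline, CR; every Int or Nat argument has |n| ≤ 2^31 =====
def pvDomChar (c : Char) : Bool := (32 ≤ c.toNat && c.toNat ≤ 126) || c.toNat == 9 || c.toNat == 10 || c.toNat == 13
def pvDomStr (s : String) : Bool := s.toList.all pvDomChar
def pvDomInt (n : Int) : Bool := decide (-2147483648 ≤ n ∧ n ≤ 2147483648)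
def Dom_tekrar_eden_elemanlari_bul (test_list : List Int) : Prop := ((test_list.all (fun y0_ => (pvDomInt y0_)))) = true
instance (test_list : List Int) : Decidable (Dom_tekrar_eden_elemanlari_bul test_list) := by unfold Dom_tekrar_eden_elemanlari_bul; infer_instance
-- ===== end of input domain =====

-- B replaces A's per-distinct-element rescan of the whole list with one enumerate pass
-- building an insertion-ordered dict element -> index list, then one emit pass (faster, as measured).

-- ===== PORT A =====
def tekrar_eden_elemanlari_bul (test_list : List Int) : List (List (List Int)) :=
  let liste := test_list.foldl (fun l eleman => if l.contains eleman then l else l ++ [eleman]) []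
  liste.foldl (fun new_list eleman =>
    if test_list.contains eleman then
      let st := test_list.foldl
        (fun (p : Int × Int × List Int) member =>
          let sayac := p.2.1 + 1
          if member = eleman then (p.1 + 1, sayac, p.2.2 ++ [sayac])
          else (p.1, sayac, p.2.2))
        (0, -1, [])
      new_list ++ [[[eleman, st.1], st.2.2]]
    else new_list) []

-- ===== PORT B =====
def tekrar_eden_elemanlari_bul_alt (test_list : List Int) : List (List (List Int)) :=
  (((PySem.List.enumerate test_list 0).foldl
      (fun d p => d.modify p.2 [] (fun idx => idx ++ [p.1])) PySem.Dict.empty).items).map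
    (fun kv => [[kv.1, (kv.2.length : Int)], kv.2])

-- ===== PRECONDITION & SPEC =====
def Spec_tekrar_eden_elemanlari_bul (test_list : List Int) (out : List (List (List Int))) : Prop := out = tekrar_eden_elemanlari_bul_alt test_list
instance (test_list : List Int) (out : List (List (List Int))) : Decidable (Spec_tekrar_eden_elemanlari_bul test_list out) := by unfold Spec_tekrar_eden_elemanlari_bul; infer_instance

-- ===== CLAIM (what is proved, stated in full; the proofs are below) =====
def Claim_equal_tekrar_eden_elemanlari_bul : Prop := ∀ (test_list : List Int), Dom_tekrar_eden_elemanlari_bul test_list → Spec_tekrar_eden_elemanlari_bul test_list (tekrar_eden_elemanlari_bul test_list)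

-- ===== LEMMAS AND PROOFS =====

/-- Indices (counted from `s`) at which `e` occurs in `l`. -/
def pvIdxs (l : List Int) (e : Int) (s : Int) : List Int :=
  ((PySem.List.enumerate l s).filter (fun p => p.2 == e)).map (·.1)

theorem pvIdxs_nil (e s : Int) : pvIdxs [] e s = [] := rfl

theorem pvIdxs_cons (h : Int) (t : List Int) (e s : Int) :
    pvIdxs (h :: t) e s = (if h = e then [s] else []) ++ pvIdxs t e (s + 1) := by
  simp [pvIdxs, PySem.List.enumerate_cons, List.filter_cons]
  split_ifs with hh <;> simp [hh]

theorem pvIdxs_length (l : List Int) (e : Int) (s : Int) :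
    (pvIdxs l e s).length = l.count e := by
  induction l generalizing s with
  | nil => rfl
  | cons h t ih =>
    rw [pvIdxs_cons]
    by_cases hh : h = e <;>
      simp [hh, ih]

/-- A's inner counting/indexing loop. -/
theorem pvInner (l : List Int) (e : Int) (c s : Int) (acc : List Int) :
    l.foldl
      (fun (p : Int × Int × List Int) member =>
        let sayac := p.2.1 + 1
        if member = e then (p.1 + 1, sayac, p.2.2 ++ [sayac])
        else (p.1, sayac, p.2.2))
      (c, s, acc)
    = (c + (l.count e : Int), s + (l.length : Int), acc ++ pvIdxs l e (s + 1)) := by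
  induction l generalizing c s acc with
  | nil => simp [pvIdxs_nil]
  | cons h t ih =>
    rw [pvIdxs_cons]
    by_cases hh : h = e
    · rw [List.foldl_cons, if_pos hh, ih]
      subst hh
      simp only [List.count_cons, Prod.mk.injEq, List.append_assoc, List.length_cons]
      refine ⟨by simp; omega, by push_cast; ring, by simp⟩
    · rw [List.foldl_cons, if_neg hh, ih]
      simp only [List.count_cons, Prod.mk.injEq, List.length_cons]
      refine ⟨by simp [hh], by push_cast; ring, by simp [hh]⟩

/-- A's dedup loop is `PySem.Set.ofList`. -/
theorem pvDedup (l : List Int) :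
    l.foldl (fun acc eleman => if acc.contains eleman then acc else acc ++ [eleman]) []
      = PySem.Set.ofList l := by
  rw [PySem.Set.ofList_eq_foldl]
  apply PySem.List.foldl_congr_mem
  intro acc x _
  simp [PySem.Set.add]

/-- A computes the map of the common spec over the deduped list. -/
theorem pvA_spec (test_list : List Int) :
    tekrar_eden_elemanlari_bul test_list
      = (PySem.Set.ofList test_list).map
          (fun e => [[e, (test_list.count e : Int)], pvIdxs test_list e 0]) := by
  unfold tekrar_eden_elemanlari_bul
  rw [pvDedup]
  rw [PySem.List.foldl_congr_mem'
      (g := fun new_list e =>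
        new_list ++ [[[e, (test_list.count e : Int)], pvIdxs test_list e 0]])]
  · rw [PySem.List.foldl_append_singleton_eq_map]; simp
  · intro e he acc
    have hmem : test_list.contains e = true := by
      have he2 : e ∈ test_list := (PySem.Set.mem_ofList test_list e).1 he
      simpa [List.contains_iff_mem] using he2
    simp only [hmem, if_true, pvInner]
    norm_num

/-- B's dict keys are the distinct elements in first-appearance order. -/
theorem pvB_keys (test_list : List Int) :
    ((PySem.List.enumerate test_list 0).foldl
      (fun d p => d.modify p.2 [] (fun idx => idx ++ [p.1])) PySem.Dict.empty).keys
    = PySem.Set.ofList test_list := by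
  rw [PySem.Dict.keys_foldl_modify_key
      (key := fun p : Int × Int => p.2) (f := fun _ p => fun idx => idx ++ [p.1])]
  simp [PySem.List.map_snd_enumerate, PySem.Set.update_nil_left, PySem.Dict.empty]

/-- B's dict value at `e` is the index list of `e`. -/
theorem pvB_getD (test_list : List Int) (e : Int) :
    ((PySem.List.enumerate test_list 0).foldl
      (fun d p => d.modify p.2 [] (fun idx => idx ++ [p.1])) PySem.Dict.empty).getD e []
    = pvIdxs test_list e 0 := by
  have hmap :
      (PySem.List.enumerate test_list 0).foldl
        (fun d p => d.modify p.2 [] (fun idx => idx ++ [p.1])) PySem.Dict.empty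
      = ((PySem.List.enumerate test_list 0).map (fun p => (p.2, p.1))).foldl
        (fun d p => d.modify p.1 [] (fun idx => idx ++ [p.2])) PySem.Dict.empty := by
    rw [List.foldl_map]
  rw [hmap, PySem.Dict.getD_foldl_modify_append]
  simp [pvIdxs, List.filter_map, Function.comp_def]

-- ===== VERDICT (by name: the statement is the Claim_ definition above) =====
theorem tekrar_eden_elemanlari_bul_spec : Claim_equal_tekrar_eden_elemanlari_bul := by
  intro test_list _
  unfold Spec_tekrar_eden_elemanlari_bul tekrar_eden_elemanlari_bul_alt
  have hnd :
      ((PySem.List.enumerate test_list 0).foldl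
        (fun d p => d.modify p.2 [] (fun idx => idx ++ [p.1])) PySem.Dict.empty).keys.Nodup := by
    apply PySem.Dict.nodup_keys_foldl_modify_key
    decide
  rw [pvA_spec]
  rw [PySem.Dict.items_eq_map_keys _ hnd []]
  rw [pvB_keys]
  rw [List.map_map]
  apply List.map_congr_left
  intro e _
  simp [Function.comp, pvB_getD, pvIdxs_length]
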